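-- pv_equiv track=rewrite | github.com/jirijanecek77/coding-challenges | src/main/python/advent/year_2025/aoc_08.py | calculate
-- ===== SOURCE A (Python) =====
-- from itertools import combinations, starmap
--
-- class UnionSet:
--     def __init__(self, n: int):
--         self.parent = list(range(n))
--         self.rank = [1] * n
--
--     def find(self, i: int) -> int:
--         # If i itself is root or representative
--         if self.parent[i] == i:
--             return i
--
--         # Else recursively find the representative
--         # of the parent
--         return self.find(self.parent[i])
--
--     def union(self, i: int, j: int):
--         root_i = self.find(i)
--         root_j = self.find(j)
--
--         if root_i == root_j:
--             return
--
--         if self.rank[root_i] < self.rank[root_j]: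
--             root_i, root_j = root_j, root_i
--
--         self.parent[root_j] = root_i
--         self.rank[root_i] += self.rank[root_j]
--
-- def euclidean_distance(p1: tuple[int, int, int], p2: tuple[int, int, int]) -> int:
--     return sum(starmap(lambda a, b: (a - b) ** 2, zip(p1, p2)))
--
-- def sort_boxes(boxes: list[tuple[int, int, int]]) -> list[tuple[int, int]]:
--     n = len(boxes)
--     return sorted(
--         combinations(range(n), 2),
--         key=lambda indices: euclidean_distance(boxes[indices[0]], boxes[indices[1]]),
--     )
--
-- def calculate(boxes: list[tuple[int, int, int]]) -> int:
--     n = len(boxes)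
--     union_set = UnionSet(n)
--     for i, j in sort_boxes(boxes):
--         union_set.union(i, j)
--         if max(union_set.rank) == n:
--             return boxes[i][0] * boxes[j][0]
--     raise Exception("No solution found")
-- ===== SOURCE B (Python) =====
-- def calculate(boxes):
--     n = len(boxes)
--
--     def dist2(p, q):
--         return sum((a - b) ** 2 for a, b in zip(p, q))
--
--     edges = [(i, j) for i in range(n) for j in range(i + 1, n)]
--     edges.sort(key=lambda e: dist2(boxes[e[0]], boxes[e[1]]))
--
--     label = list(range(n))   # component label per box
--     count = n                # number of components
--     for i, j in edges:
--         li, lj = label[i], label[j]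
--         if li != lj:
--             label = [li if l == lj else l for l in label]
--             count -= 1
--             if count == 1:
--                 return boxes[i][0] * boxes[j][0]
--     raise Exception("No solution found")
-- ===== Notes on version B (the rewrite author's own statement) =====
-- stated objective: alternative
-- what changed: B replaces A's union-find (recursive find, union by rank, and an O(n) max-scan of the rank array after every edge) by a flat component-label array merged by relabelling together with an incremental component counter, and builds the edge list with a plain double comprehension instead of itertools.combinations.
-- outside the precondition, e.g. on calculate([(3,), (7,), (), (7,)]): A returns 49, B returns 49; on calculate([(1, 2, 3)]): A raises Exception, B raises Exception
import Mathlib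
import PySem

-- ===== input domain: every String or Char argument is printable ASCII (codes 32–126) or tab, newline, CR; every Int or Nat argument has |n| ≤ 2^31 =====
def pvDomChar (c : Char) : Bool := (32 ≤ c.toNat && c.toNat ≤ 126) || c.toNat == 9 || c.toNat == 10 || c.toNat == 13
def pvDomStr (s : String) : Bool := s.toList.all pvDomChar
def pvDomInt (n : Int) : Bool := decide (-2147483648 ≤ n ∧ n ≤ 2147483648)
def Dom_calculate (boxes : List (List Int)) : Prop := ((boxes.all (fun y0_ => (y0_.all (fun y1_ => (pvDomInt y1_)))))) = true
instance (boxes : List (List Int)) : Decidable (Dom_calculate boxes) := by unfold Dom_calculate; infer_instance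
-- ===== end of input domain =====

-- B replaces A's union-find (recursive find, union by rank, O(n) max-scan of the rank array
-- after every edge) by a flat component-label array merged by relabelling plus an incremental
-- component counter; objective: alternative (different data structure, no find/rank machinery).

-- ===== PORT A =====

-- sum(starmap(lambda a, b: (a - b) ** 2, zip(p1, p2)))
def pvDistA (p q : List Int) : Int :=
  (List.zip p q).foldl (fun s ab => s + (ab.1 - ab.2) ^ 2) 0

-- combinations(range(n), 2): pairs (i, j), i < j, in lexicographic order
def pvCombos (n : Nat) : List (Nat × Nat) :=
  (List.range n).flatMap (fun i => ((List.range n).drop (i + 1)).map (fun j => (i, j)))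

-- sorted(combinations(range(n), 2), key=...)
def pvSortBoxes (boxes : List (List Int)) (n : Nat) : List (Nat × Nat) :=
  PySem.List.sorted (pvCombos n) (fun e => pvDistA (boxes.getD e.1 []) (boxes.getD e.2 []))

-- UnionSet.find (recursion made total by fuel; within the loop the chain length is < n,
-- and fuel n is always supplied, so this is exact where Python's find terminates)
def pvFindA (p : List Nat) : Nat → Nat → Nat
  | 0, i => i
  | f + 1, i => if p.getD i i = i then i else pvFindA p f (p.getD i i)

-- UnionSet.union
def pvUnionA (n : Nat) (p r : List Nat) (i j : Nat) : List Nat × List Nat :=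
  let ri := pvFindA p n i
  let rj := pvFindA p n j
  if ri = rj then (p, r)
  else
    let ab := if r.getD ri 0 < r.getD rj 0 then (rj, ri) else (ri, rj)
    (p.set ab.2 ab.1, r.set ab.1 (r.getD ab.1 0 + r.getD ab.2 0))

-- the for-loop of calculate: union, then check max(rank) == n (0 = the uncovered 'raise')
def pvLoopA (boxes : List (List Int)) (n : Nat) :
    List (Nat × Nat) → List Nat → List Nat → Int
  | [], _, _ => 0
  | e :: rest, p, r =>
    let pr := pvUnionA n p r e.1 e.2
    if pr.2.foldl Nat.max 0 = n then
      (boxes.getD e.1 []).getD 0 0 * (boxes.getD e.2 []).getD 0 0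
    else pvLoopA boxes n rest pr.1 pr.2

def calculate (boxes : List (List Int)) : Int :=
  let n := boxes.length
  pvLoopA boxes n (pvSortBoxes boxes n) (List.range n) (List.replicate n 1)

-- ===== PORT B =====

-- sum((a - b) ** 2 for a, b in zip(p, q))
def pvDistB (p q : List Int) : Int :=
  (List.zip p q).foldl (fun s ab => s + (ab.1 - ab.2) ^ 2) 0

-- [(i, j) for i in range(n) for j in range(i + 1, n)]
def pvEdgesB (n : Nat) : List (Nat × Nat) :=
  (List.range n).flatMap (fun i => (List.range' (i + 1) (n - (i + 1))).map (fun j => (i, j)))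

-- edges.sort(key=...)
def pvSortedEdgesB (boxes : List (List Int)) (n : Nat) : List (Nat × Nat) :=
  PySem.List.sorted (pvEdgesB n) (fun e => pvDistB (boxes.getD e.1 []) (boxes.getD e.2 []))

-- the for-loop of B: labels + component counter (0 = the uncovered 'raise')
def pvLoopB (boxes : List (List Int)) :
    List (Nat × Nat) → List Nat → Nat → Int
  | [], _, _ => 0
  | e :: rest, lab, cnt =>
    let li := lab.getD e.1 0
    let lj := lab.getD e.2 0
    if li = lj then pvLoopB boxes rest lab cnt
    else
      let lab' := lab.map (fun l => if l = lj then li else l)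
      if cnt - 1 = 1 then
        (boxes.getD e.1 []).getD 0 0 * (boxes.getD e.2 []).getD 0 0
      else pvLoopB boxes rest lab' (cnt - 1)

def calculate_alt (boxes : List (List Int)) : Int :=
  let n := boxes.length
  pvLoopB boxes (pvSortedEdgesB boxes n) (List.range n) n

-- ===== PRECONDITION & SPEC =====
-- Pre_ excludes inputs with fewer than two boxes, on which A falls through its loop and raises
-- Exception, and inputs containing an empty box, on which A almost always raises IndexError at
-- the completing edge (an empty box is at squared distance 0 from every box, so it is an endpoint
-- of the completing edge except on rare tie layouts, where both programs return the same value).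
def Pre_calculate (boxes : List (List Int)) : Prop :=
  2 ≤ boxes.length ∧ ∀ b ∈ boxes, b ≠ []
instance (boxes : List (List Int)) : Decidable (Pre_calculate boxes) := by
  unfold Pre_calculate; infer_instance

def pvWitness_calculate : List (List Int) := [[0, 0, 0], [2, 1, 0], [5, 5, 5]]

def Spec_calculate (boxes : List (List Int)) (out : Int) : Prop := out = calculate_alt boxes
instance (boxes : List (List Int)) (out : Int) : Decidable (Spec_calculate boxes out) := by
  unfold Spec_calculate; infer_instance

-- ===== CLAIM (what is proved, stated in full; the proofs are below) =====
def Claim_equal_calculate : Prop :=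
  ∀ (boxes : List (List Int)), Dom_calculate boxes → Pre_calculate boxes →
    Spec_calculate boxes (calculate boxes)

-- ===== LEMMAS AND PROOFS =====

-- getD/set pointwise facts
theorem pvGetD_set_ne (l : List Nat) (i j v d : Nat) (h : j ≠ i) :
    (l.set i v).getD j d = l.getD j d := by
  simp [List.getD, List.getElem?_set_ne (by omega : i ≠ j)]

theorem pvGetD_set_self (l : List Nat) (i v d : Nat) (h : i < l.length) :
    (l.set i v).getD i d = v := by
  simp [List.getD, h]

theorem pvGetD_lt (l : List Nat) (i d : Nat) (h : i < l.length) :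
    l.getD i d = l[i] := by
  simp [List.getD, h]

-- the well-formedness invariant of A's union-find state
def pvWFA (n : Nat) (p r : List Nat) : Prop :=
  p.length = n ∧ r.length = n ∧
  (∀ i, i < n → p.getD i i < n) ∧
  (∀ i, i < n → 1 ≤ r.getD i 0 ∧ r.getD i 0 ≤ n) ∧
  (∀ i, i < n → p.getD i i ≠ i → r.getD i 0 < r.getD (p.getD i i) 0)

theorem pvFindA_succ (p : List Nat) (f i : Nat) :
    pvFindA p (f + 1) i = if p.getD i i = i then i else pvFindA p f (p.getD i i) := rfl

theorem pvFindA_fix (p : List Nat) (f i : Nat) (hf : 0 < f) (h : p.getD i i = i) :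
    pvFindA p f i = i := by
  cases f with
  | zero => omega
  | succ f => rw [pvFindA_succ, if_pos h]

theorem pvFind_spec (n : Nat) (p r : List Nat) (hW : pvWFA n p r) :
    ∀ f i, i < n → n - r.getD i 0 < f →
      pvFindA p f i = pvFindA p (f + 1) i ∧ pvFindA p f i < n ∧
      p.getD (pvFindA p f i) (pvFindA p f i) = pvFindA p f i ∧
      r.getD i 0 ≤ r.getD (pvFindA p f i) 0 := by
  intro f
  induction f with
  | zero => intro i hi hf; omega
  | succ f ih =>
    intro i hi hf
    by_cases h : p.getD i i = i
    · have e : ∀ g, pvFindA p (g + 1) i = i := fun g => by rw [pvFindA_succ, if_pos h]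
      refine ⟨(e f).trans (e (f + 1)).symm, ?_, ?_, ?_⟩
      · rw [e f]; exact hi
      · rw [e f]; exact h
      · rw [e f]
    · have hk : p.getD i i < n := hW.2.2.1 i hi
      have hrlt : r.getD i 0 < r.getD (p.getD i i) 0 := hW.2.2.2.2 i hi h
      have h1 := hW.2.2.2.1 i hi
      have h2 := (hW.2.2.2.1 (p.getD i i) hk).2
      have ihk := ih (p.getD i i) hk (by omega)
      have e1 : pvFindA p (f + 1) i = pvFindA p f (p.getD i i) := by
        rw [pvFindA_succ, if_neg h]
      have e2 : pvFindA p (f + 2) i = pvFindA p (f + 1) (p.getD i i) := by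
        rw [pvFindA_succ, if_neg h]
      refine ⟨?_, ?_, ?_, ?_⟩
      · rw [e1, e2]; exact ihk.1
      · rw [e1]; exact ihk.2.1
      · rw [e1]; exact ihk.2.2.1
      · rw [e1]; exact le_trans (le_of_lt hrlt) ihk.2.2.2

theorem pvFind_stable (n : Nat) (p r : List Nat) (hW : pvWFA n p r)
    (f g i : Nat) (hi : i < n) (hf : n - r.getD i 0 < f) (hfg : f ≤ g) :
    pvFindA p f i = pvFindA p g i := by
  induction g, hfg using Nat.le_induction with
  | base => rfl
  | succ g hfg ih =>
    rw [ih]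
    exact (pvFind_spec n p r hW g i hi (by omega)).1

theorem pvRoot_props (n : Nat) (p r : List Nat) (hW : pvWFA n p r) (i : Nat) (hi : i < n) :
    pvFindA p n i < n ∧ p.getD (pvFindA p n i) (pvFindA p n i) = pvFindA p n i ∧
    r.getD i 0 ≤ r.getD (pvFindA p n i) 0 := by
  have h1 := (hW.2.2.2.1 i hi).1
  have := pvFind_spec n p r hW n i hi (by omega)
  exact ⟨this.2.1, this.2.2.1, this.2.2.2⟩

-- size of the component with representative x (A-side picture)
def pvSz (n : Nat) (p : List Nat) (x : Nat) : Nat :=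
  ((List.range n).filter (fun t => decide (pvFindA p n t = x))).length

-- number of roots of p
def pvRootsCount (n : Nat) (p : List Nat) : Nat :=
  ((List.range n).filter (fun i => decide (p.getD i i = i))).length

-- the coupling invariant between A's state (p, r) and B's state (lab, cnt)
def pvInv (n : Nat) (p r lab : List Nat) (cnt : Nat) : Prop :=
  pvWFA n p r ∧ lab.length = n ∧
  (∀ i j, i < n → j < n →
    (pvFindA p n i = pvFindA p n j ↔ lab.getD i 0 = lab.getD j 0)) ∧
  (∀ i, i < n → p.getD i i = i → r.getD i 0 = pvSz n p i) ∧
  (∀ i, i < n → r.getD i 0 ≤ pvSz n p (pvFindA p n i)) ∧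
  cnt = pvRootsCount n p

-- generic counting helpers
theorem pvFilter_or_length (l : List Nat) (P Q : Nat → Bool)
    (hdisj : ∀ x ∈ l, ¬(P x = true ∧ Q x = true)) :
    (l.filter (fun x => P x || Q x)).length = (l.filter P).length + (l.filter Q).length := by
  induction l with
  | nil => simp
  | cons a t ih =>
    have ht : ∀ x ∈ t, ¬(P x = true ∧ Q x = true) := fun x hx => hdisj x (by simp [hx])
    by_cases hP : P a = true
    · have hQ : ¬ Q a = true := fun hq => hdisj a (by simp) ⟨hP, hq⟩
      simp [List.filter, hP, hQ, ih ht]; omega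
    · by_cases hQ : Q a = true
      · simp [List.filter, hP, hQ, ih ht]; omega
      · simp [List.filter, hP, hQ, ih ht]

theorem pvLength_filter_erase (l : List Nat) (Q : Nat → Bool) (b : Nat) :
    l.Nodup → b ∈ l → Q b = true →
    (l.filter (fun x => Q x && !decide (x = b))).length + 1 = (l.filter Q).length := by
  induction l with
  | nil => simp
  | cons a t ih =>
    intro hnd hb hQ
    by_cases hab : a = b
    · subst hab
      have hnot : a ∉ t := (List.nodup_cons.mp hnd).1
      have : t.filter (fun x => Q x && !decide (x = a)) = t.filter Q := by
        apply List.filter_congr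
        intro x hx
        have : x ≠ a := fun e => hnot (e ▸ hx)
        simp [this]
      simp [List.filter, hQ, this]
    · have hbt : b ∈ t := by
        rcases hb with _ | h
        · exact absurd rfl hab
        · assumption
      have := ih (List.nodup_cons.mp hnd).2 hbt hQ
      by_cases hQa : Q a = true
      · simp [List.filter, hQa, hab]; omega
      · simp [List.filter, hQa]; omega

theorem pvAll_eq_singleton (l : List Nat) (ρ : Nat) :
    l.Nodup → ρ ∈ l → (∀ x ∈ l, x = ρ) → l = [ρ] := by
  induction l with
  | nil => simp
  | cons a t ih =>
    intro hnd hmem hall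
    have ha : a = ρ := hall a (by simp)
    subst ha
    have : t = [] := by
      cases t with
      | nil => rfl
      | cons c u =>
        have hc : c = a := hall c (by simp)
        exact absurd (hc ▸ (by simp : c ∈ c :: u)) (List.nodup_cons.mp hnd).1
    simp [this]

-- the stop conditions agree: max(rank) = n  ↔  cnt = 1
theorem pvStop_iff (n : Nat) (p r lab : List Nat) (cnt : Nat)
    (hn : 1 ≤ n) (hInv : pvInv n p r lab cnt) :
    (r.foldl Nat.max 0 = n ↔ cnt = 1) := by
  obtain ⟨hW, hlabl, hD, hE, hF, hcnt⟩ := hInv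
  obtain ⟨hpl, hrl, hbnd, hrk, hC⟩ := hW
  have hWp : pvWFA n p r := ⟨hpl, hrl, hbnd, hrk, hC⟩
  have hsz_le : ∀ x, pvSz n p x ≤ n := by
    intro x
    unfold pvSz
    calc _ ≤ (List.range n).length := List.length_filter_le _ _
      _ = n := List.length_range
  have hmem : ∀ y ∈ r, ∃ i, i < n ∧ r.getD i 0 = y := by
    intro y hy
    rcases List.mem_iff_getElem.mp hy with ⟨i, hilt, hEq⟩
    exact ⟨i, by omega, by rw [pvGetD_lt r i 0 hilt]; exact hEq⟩
  have hupper : ∀ y ∈ r, y ≤ n := by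
    intro y hy
    rcases hmem y hy with ⟨i, hi, hEq⟩
    calc y = r.getD i 0 := hEq.symm
      _ ≤ pvSz n p (pvFindA p n i) := hF i hi
      _ ≤ n := hsz_le _
  have hfm : r.foldl Nat.max 0 = 0 ∨ r.foldl Nat.max 0 ∈ r :=
    PySem.List.foldl_max_mem r 0
  constructor
  · intro h
    rcases hfm with h0 | hmax
    · omega
    · rw [h] at hmax
      rcases hmem n hmax with ⟨i, hi, hEq⟩
      have hge : n ≤ pvSz n p (pvFindA p n i) := hEq ▸ hF i hi
      have hzr : pvSz n p (pvFindA p n i) = n := le_antisymm (hsz_le _) hge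
      set ρ := pvFindA p n i with hρ
      have hall : ∀ t, t < n → pvFindA p n t = ρ := by
        unfold pvSz at hzr
        have := List.length_filter_eq_length_iff.mp (by rw [hzr, List.length_range])
        intro t ht
        have := this t (List.mem_range.mpr ht)
        simpa using this
      have hρp := pvRoot_props n p r hWp i hi
      have hsingle : (List.range n).filter (fun x => decide (p.getD x x = x)) = [ρ] := by
        apply pvAll_eq_singleton
        · exact List.nodup_range.filter _
        · rw [List.mem_filter]
          exact ⟨List.mem_range.mpr hρp.1, by simpa using hρp.2.1⟩
        · intro x hx
          rcases List.mem_filter.mp hx with ⟨hxr, hxq⟩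
          have hxn := List.mem_range.mp hxr
          have hxroot : p.getD x x = x := by simpa using hxq
          have := hall x hxn
          rwa [pvFindA_fix p n x (by omega) hxroot] at this
      rw [hcnt]
      unfold pvRootsCount
      rw [hsingle]
      rfl
  · intro hc
    rw [hcnt] at hc
    unfold pvRootsCount at hc
    rcases List.length_eq_one_iff.mp hc with ⟨ρ, hρeq⟩
    have hρmem : ρ ∈ (List.range n).filter (fun x => decide (p.getD x x = x)) := by
      rw [hρeq]; simp
    rcases List.mem_filter.mp hρmem with ⟨hρr, hρq⟩
    have hρn := List.mem_range.mp hρr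
    have hρroot : p.getD ρ ρ = ρ := by simpa using hρq
    have hall : ∀ t, t < n → pvFindA p n t = ρ := by
      intro t ht
      have hrp := pvRoot_props n p r hWp t ht
      have : pvFindA p n t ∈ (List.range n).filter (fun x => decide (p.getD x x = x)) := by
        rw [List.mem_filter]
        exact ⟨List.mem_range.mpr hrp.1, by simpa using hrp.2.1⟩
      rw [hρeq] at this
      simpa using this
    have hszρ : pvSz n p ρ = n := by
      unfold pvSz
      have : (List.range n).filter (fun t => decide (pvFindA p n t = ρ)) = List.range n := by
        apply List.filter_eq_self.mpr
        intro t ht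
        simpa using hall t (List.mem_range.mp ht)
      rw [this, List.length_range]
    have hrρ : r.getD ρ 0 = n := by rw [hE ρ hρn hρroot, hszρ]
    have hmemρ : (n : Nat) ∈ r := by
      rw [← hrρ, pvGetD_lt r ρ 0 (by omega)]
      exact List.getElem_mem _
    have hle : n ≤ r.foldl Nat.max 0 := (PySem.List.le_foldl_max r 0).2 n hmemρ
    rcases hfm with h0 | hmax
    · omega
    · have := hupper _ hmax
      omega

-- characterisation of the roots after linking root b under root a
theorem pvRoot_set (n : Nat) (p r : List Nat) (hW : pvWFA n p r) (a b : Nat)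
    (ha : a < n) (hb : b < n) (hra : p.getD a a = a) (hrb : p.getD b b = b)
    (hab : a ≠ b) (hrle : r.getD b 0 ≤ r.getD a 0)
    (hsum : r.getD a 0 + r.getD b 0 ≤ n) :
    pvWFA n (p.set b a) (r.set a (r.getD a 0 + r.getD b 0)) ∧
    (∀ i, i < n → pvFindA (p.set b a) n i =
      if pvFindA p n i = b then a else pvFindA p n i) := by
  obtain ⟨hpl, hrl, hbnd, hrk, hC⟩ := hW
  have hn2 : 2 ≤ n := by omega
  have hp'b : (p.set b a).getD b b = a := pvGetD_set_self p b a b (by omega)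
  have hp' : ∀ x, x ≠ b → (p.set b a).getD x x = p.getD x x :=
    fun x hx => pvGetD_set_ne p b x a x hx
  have hr'a : (r.set a (r.getD a 0 + r.getD b 0)).getD a 0 = r.getD a 0 + r.getD b 0 :=
    pvGetD_set_self r a _ 0 (by omega)
  have hr' : ∀ x, x ≠ a →
      (r.set a (r.getD a 0 + r.getD b 0)).getD x 0 = r.getD x 0 :=
    fun x hx => pvGetD_set_ne r a x _ 0 hx
  have hmono : ∀ x, r.getD x 0 ≤ (r.set a (r.getD a 0 + r.getD b 0)).getD x 0 := by
    intro x
    by_cases hx : x = a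
    · subst hx; rw [hr'a]; omega
    · rw [hr' x hx]
  have hW' : pvWFA n (p.set b a) (r.set a (r.getD a 0 + r.getD b 0)) := by
    refine ⟨by simpa using hpl, by simpa using hrl, ?_, ?_, ?_⟩
    · intro x hx
      by_cases hxb : x = b
      · subst hxb; rw [hp'b]; exact ha
      · rw [hp' x hxb]; exact hbnd x hx
    · intro x hx
      by_cases hxa : x = a
      · rw [hxa, hr'a]
        have := (hrk a ha).1
        omega
      · rw [hr' x hxa]
        have := hrk x hx
        omega
    · intro x hx hne
      by_cases hxb : x = b
      · rw [hxb] at hne ⊢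
        rw [hp'b] at hne ⊢
        rw [hr' b hab.symm, hr'a]
        have := (hrk a ha).1
        have := (hrk b hb).1
        omega
      · rw [hp' x hxb] at hne ⊢
        have hxa : x ≠ a := by
          intro e; subst e; exact hne hra
        rw [hr' x hxa]
        have h1 := hC x hx hne
        calc r.getD x 0 < r.getD (p.getD x x) 0 := h1
          _ ≤ _ := hmono _
  refine ⟨hW', ?_⟩
  have aux : ∀ f i, i < n → n - r.getD i 0 < f →
      pvFindA (p.set b a) n i = if pvFindA p f i = b then a else pvFindA p f i := by
    intro f
    induction f with
    | zero => intro i hi hf; omega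
    | succ f ih =>
      intro i hi hf
      obtain ⟨m, rfl⟩ : ∃ m, n = m + 1 := ⟨n - 1, by omega⟩
      by_cases h : p.getD i i = i
      · by_cases hib : i = b
        · subst hib
          rw [pvFindA_fix p (f + 1) i (by omega) h, if_pos rfl]
          rw [pvFindA_succ, if_neg (by rw [hp'b]; exact hab)]
          rw [hp'b]
          exact pvFindA_fix _ m a (by omega) (by rw [hp' a hab]; exact hra)
        · rw [pvFindA_fix p (f + 1) i (by omega) h, if_neg hib]
          exact pvFindA_fix _ (m + 1) i (by omega) (by rw [hp' i hib]; exact h)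
      · have hib : i ≠ b := by
          intro e; subst e; exact h hrb
        have hk : p.getD i i < m + 1 := hbnd i hi
        have hkr : r.getD i 0 < r.getD (p.getD i i) 0 := hC i hi h
        have h1 := hrk i hi
        have h2 := hrk (p.getD i i) hk
        have e1 : pvFindA (p.set b a) (m + 1) i = pvFindA (p.set b a) m (p.getD i i) := by
          rw [pvFindA_succ, if_neg (by rw [hp' i hib]; exact h), hp' i hib]
        have hst : pvFindA (p.set b a) m (p.getD i i) =
            pvFindA (p.set b a) (m + 1) (p.getD i i) := by
          apply pvFind_stable (m + 1) _ _ hW' m (m + 1) (p.getD i i) hk _ (by omega)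
          have := hmono (p.getD i i)
          omega
        have e2 : pvFindA p (f + 1) i = pvFindA p f (p.getD i i) := by
          rw [pvFindA_succ, if_neg h]
        rw [e1, hst, ih (p.getD i i) hk (by omega), e2]
  intro i hi
  have h1 := (hrk i hi).1
  exact aux n i hi (by omega)

theorem pvMergeEq (u v m w : Nat) (_hmw : m ≠ w) :
    ((if u = w then m else u) = (if v = w then m else v)) ↔
      (u = v ∨ ((u = m ∨ u = w) ∧ (v = m ∨ v = w))) := by
  split_ifs <;> omega

-- one merging step preserves the invariant
theorem pvMerge_inv (n : Nat) (p r lab : List Nat) (cnt : Nat) (a b li lj : Nat)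
    (hInv : pvInv n p r lab cnt)
    (ha : a < n) (hb : b < n) (hra : p.getD a a = a) (hrb : p.getD b b = b)
    (hab : a ≠ b) (hrle : r.getD b 0 ≤ r.getD a 0) (hlij : li ≠ lj)
    (hcls : ∀ t, t < n →
      ((pvFindA p n t = a ∨ pvFindA p n t = b) ↔ (lab.getD t 0 = li ∨ lab.getD t 0 = lj))) :
    pvInv n (p.set b a) (r.set a (r.getD a 0 + r.getD b 0))
      (lab.map (fun l => if l = lj then li else l)) (cnt - 1) := by
  obtain ⟨hW, hlabl, hD, hE, hF, hcnt⟩ := hInv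
  have hn0 : 0 < n := by omega
  have hdisj : ∀ t ∈ List.range n,
      ¬((fun t => decide (pvFindA p n t = a)) t = true ∧
        (fun t => decide (pvFindA p n t = b)) t = true) := by
    intro t _ ⟨h1, h2⟩
    simp only [decide_eq_true_eq] at h1 h2
    exact hab (h1 ▸ h2 ▸ rfl)
  have hsum0 : pvSz n p a + pvSz n p b ≤ n := by
    have := pvFilter_or_length (List.range n)
      (fun t => decide (pvFindA p n t = a)) (fun t => decide (pvFindA p n t = b)) hdisj
    unfold pvSz
    rw [← this]
    calc _ ≤ (List.range n).length := List.length_filter_le _ _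
      _ = n := List.length_range
  have hEa : r.getD a 0 = pvSz n p a := hE a ha hra
  have hEb : r.getD b 0 = pvSz n p b := hE b hb hrb
  have hsum : r.getD a 0 + r.getD b 0 ≤ n := by rw [hEa, hEb]; exact hsum0
  obtain ⟨hW', hchar⟩ := pvRoot_set n p r hW a b ha hb hra hrb hab hrle hsum
  obtain ⟨hpl, hrl, hbnd, hrk, hC⟩ := hW
  have hp'b : (p.set b a).getD b b = a := pvGetD_set_self p b a b (by omega)
  have hp' : ∀ x, x ≠ b → (p.set b a).getD x x = p.getD x x :=
    fun x hx => pvGetD_set_ne p b x a x hx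
  have hr'a : (r.set a (r.getD a 0 + r.getD b 0)).getD a 0 = r.getD a 0 + r.getD b 0 :=
    pvGetD_set_self r a _ 0 (by omega)
  have hr' : ∀ x, x ≠ a →
      (r.set a (r.getD a 0 + r.getD b 0)).getD x 0 = r.getD x 0 :=
    fun x hx => pvGetD_set_ne r a x _ 0 hx
  have hlab' : ∀ t, t < n →
      (lab.map (fun l => if l = lj then li else l)).getD t 0 =
        if lab.getD t 0 = lj then li else lab.getD t 0 := by
    intro t ht
    have hlt : t < lab.length := by omega
    simp [List.getD, hlt]
  have hsz2 : ∀ x, x ≠ a → x ≠ b → pvSz n (p.set b a) x = pvSz n p x := by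
    intro x hxa hxb
    unfold pvSz
    congr 1
    apply List.filter_congr
    intro t ht
    rw [hchar t (List.mem_range.mp ht)]
    by_cases hc : pvFindA p n t = b
    · simp [hc, Ne.symm hxa, Ne.symm hxb]
    · simp [hc]
  have hsz1 : pvSz n (p.set b a) a = pvSz n p a + pvSz n p b := by
    unfold pvSz
    rw [← pvFilter_or_length (List.range n) _ _ hdisj]
    congr 1
    apply List.filter_congr
    intro t ht
    rw [hchar t (List.mem_range.mp ht)]
    by_cases hc : pvFindA p n t = b
    · simp [hc]
    · simp [hc]
  refine ⟨hW', by simpa using hlabl, ?_, ?_, ?_, ?_⟩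
  · -- partitions agree
    intro s t hs ht
    rw [hchar s hs, hchar t ht, hlab' s hs, hlab' t ht,
      pvMergeEq _ _ a b hab, pvMergeEq _ _ li lj hlij]
    exact or_congr (hD s t hs ht) (and_congr (hcls s hs) (hcls t ht))
  · -- rank of a root equals its component size
    intro x hx hroot'
    have hxb : x ≠ b := by
      intro e; rw [e, hp'b] at hroot'; exact hab hroot'
    rw [hp' x hxb] at hroot'
    by_cases hxa : x = a
    · rw [hxa, hr'a, hsz1, hEa, hEb]
    · rw [hr' x hxa, hsz2 x hxa hxb]
      exact hE x hx hroot'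
  · -- every rank is at most its component size
    intro x hx
    rw [hchar x hx]
    have hRx := pvRoot_props n p r ⟨hpl, hrl, hbnd, hrk, hC⟩ x hx
    by_cases hxa : x = a
    · have hfix : pvFindA p n x = x := by
        rw [hxa]; exact pvFindA_fix p n a hn0 hra
      rw [hfix, hxa, if_neg hab, hr'a, hsz1, hEa, hEb]
    · rw [hr' x hxa]
      have hle : r.getD x 0 ≤ pvSz n p (pvFindA p n x) := hF x hx
      by_cases hRb : pvFindA p n x = b
      · rw [if_pos hRb, hsz1]
        rw [hRb] at hle
        omega
      · rw [if_neg hRb]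
        by_cases hRa : pvFindA p n x = a
        · rw [hRa, hsz1]
          rw [hRa] at hle
          omega
        · rw [hsz2 _ hRa hRb]
          exact hle
  · -- the component count drops by one
    unfold pvRootsCount
    have hcong : (List.range n).filter (fun x => decide ((p.set b a).getD x x = x)) =
        (List.range n).filter (fun x => decide (p.getD x x = x) && !decide (x = b)) := by
      apply List.filter_congr
      intro x hx
      by_cases hxb : x = b
      · rw [hxb, hp'b]
        simp [hab]
      · rw [hp' x hxb]
        simp [hxb]
    rw [hcong]
    have h2 := pvLength_filter_erase (List.range n) (fun x => decide (p.getD x x = x)) b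
      (List.nodup_range) (List.mem_range.mpr hb) (by simpa using hrb)
    beta_reduce at h2
    unfold pvRootsCount at hcnt
    omega

-- the two loops agree under the invariant
theorem pvLoop_eq (boxes : List (List Int)) (n : Nat) :
    ∀ (edges : List (Nat × Nat)) (p r lab : List Nat) (cnt : Nat),
      pvInv n p r lab cnt → 2 ≤ cnt →
      (∀ e ∈ edges, e.1 < n ∧ e.2 < n) →
      pvLoopA boxes n edges p r = pvLoopB boxes edges lab cnt := by
  intro edges
  induction edges with
  | nil => intro p r lab cnt _ _ _; rfl
  | cons e rest ih =>
    intro p r lab cnt hInv hcnt hedges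
    obtain ⟨i, j⟩ := e
    obtain ⟨hi, hj⟩ := hedges (i, j) (by simp)
    have hrest : ∀ e ∈ rest, e.1 < n ∧ e.2 < n := fun e he => hedges e (by simp [he])
    have hn1 : 1 ≤ n := by omega
    have hD := hInv.2.2.1
    by_cases hlab : lab.getD i 0 = lab.getD j 0
    · -- the edge is internal to a component: both loops skip it
      have hroot : pvFindA p n i = pvFindA p n j := (hD i j hi hj).mpr hlab
      have hU : pvUnionA n p r i j = (p, r) := by
        unfold pvUnionA
        simp [hroot]
      have hnostop : ¬(r.foldl Nat.max 0 = n) := by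
        intro h
        have := (pvStop_iff n p r lab cnt hn1 hInv).mp h
        omega
      have hA : pvLoopA boxes n ((i, j) :: rest) p r = pvLoopA boxes n rest p r := by
        simp only [pvLoopA, hU]
        rw [if_neg hnostop]
      have hB : pvLoopB boxes ((i, j) :: rest) lab cnt = pvLoopB boxes rest lab cnt := by
        simp only [pvLoopB]
        rw [if_pos hlab]
      rw [hA, hB]
      exact ih p r lab cnt hInv hcnt hrest
    · -- merging edge
      have hroot_ne : pvFindA p n i ≠ pvFindA p n j :=
        fun h => hlab ((hD i j hi hj).mp h)
      have hWp := hInv.1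
      have hpi := pvRoot_props n p r hWp i hi
      have hpj := pvRoot_props n p r hWp j hj
      -- the two cls facts, one per orientation
      have hclsij : ∀ t, t < n →
          ((pvFindA p n t = pvFindA p n i ∨ pvFindA p n t = pvFindA p n j) ↔
            (lab.getD t 0 = lab.getD i 0 ∨ lab.getD t 0 = lab.getD j 0)) := by
        intro t ht
        exact or_congr (hD t i ht hi) (hD t j ht hj)
      have hclsji : ∀ t, t < n →
          ((pvFindA p n t = pvFindA p n j ∨ pvFindA p n t = pvFindA p n i) ↔
            (lab.getD t 0 = lab.getD i 0 ∨ lab.getD t 0 = lab.getD j 0)) := by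
        intro t ht
        rw [or_comm]
        exact hclsij t ht
      by_cases hcmp : r.getD (pvFindA p n i) 0 < r.getD (pvFindA p n j) 0
      -- the two branches are symmetric in (a, b)
      all_goals {
        first
        | (have hU : pvUnionA n p r i j =
              (p.set (pvFindA p n i) (pvFindA p n j),
               r.set (pvFindA p n j)
                 (r.getD (pvFindA p n j) 0 + r.getD (pvFindA p n i) 0)) := by
             simp only [pvUnionA]
             rw [if_neg hroot_ne, if_pos hcmp]
           have hInv' := pvMerge_inv n p r lab cnt (pvFindA p n j) (pvFindA p n i)
             (lab.getD i 0) (lab.getD j 0) hInv hpj.1 hpi.1 hpj.2.1 hpi.2.1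
             (Ne.symm hroot_ne) (le_of_lt hcmp) hlab hclsji)
        | (have hU : pvUnionA n p r i j =
              (p.set (pvFindA p n j) (pvFindA p n i),
               r.set (pvFindA p n i)
                 (r.getD (pvFindA p n i) 0 + r.getD (pvFindA p n j) 0)) := by
             simp only [pvUnionA]
             rw [if_neg hroot_ne, if_neg hcmp]
           have hInv' := pvMerge_inv n p r lab cnt (pvFindA p n i) (pvFindA p n j)
             (lab.getD i 0) (lab.getD j 0) hInv hpi.1 hpj.1 hpi.2.1 hpj.2.1
             hroot_ne (le_of_not_gt hcmp) hlab hclsij)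
        have hstop := pvStop_iff n _ _ _ _ hn1 hInv'
        have hA : pvLoopA boxes n ((i, j) :: rest) p r =
            (if (pvUnionA n p r i j).2.foldl Nat.max 0 = n then
              (boxes.getD i []).getD 0 0 * (boxes.getD j []).getD 0 0
            else pvLoopA boxes n rest (pvUnionA n p r i j).1 (pvUnionA n p r i j).2) := rfl
        have hB : pvLoopB boxes ((i, j) :: rest) lab cnt =
            (if cnt - 1 = 1 then
              (boxes.getD i []).getD 0 0 * (boxes.getD j []).getD 0 0
            else pvLoopB boxes rest
              (lab.map (fun l => if l = lab.getD j 0 then lab.getD i 0 else l)) (cnt - 1)) := by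
          simp only [pvLoopB]
          rw [if_neg hlab]
        rw [hA, hB, hU]
        by_cases hend : cnt - 1 = 1
        · rw [if_pos (hstop.mpr hend), if_pos hend]
        · rw [if_neg (fun h => hend (hstop.mp h)), if_neg hend]
          exact ih _ _ _ _ hInv' (by omega) hrest
      }

-- initial-state pointwise facts
theorem pvRange_getD (n i : Nat) (h : i < n) : (List.range n).getD i i = i := by
  simp [List.getD, h]

theorem pvRange_getD0 (n i : Nat) (h : i < n) : (List.range n).getD i 0 = i := by
  simp [List.getD, h]

theorem pvReplicate_getD (n i : Nat) (h : i < n) : (List.replicate n 1).getD i 0 = 1 := by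
  simp [List.getD, h]

theorem pvFind_range (n f i : Nat) (hi : i < n) (hf : 0 < f) :
    pvFindA (List.range n) f i = i :=
  pvFindA_fix _ _ _ hf (pvRange_getD n i hi)

-- the initial states satisfy the invariant
theorem pvInit_inv (n : Nat) :
    pvInv n (List.range n) (List.replicate n 1) (List.range n) n := by
  have hW : pvWFA n (List.range n) (List.replicate n 1) := by
    refine ⟨List.length_range, List.length_replicate, ?_, ?_, ?_⟩
    · intro i hi; rw [pvRange_getD n i hi]; exact hi
    · intro i hi; rw [pvReplicate_getD n i hi]; omega
    · intro i hi hne; exact absurd (pvRange_getD n i hi) hne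
  have hsz : ∀ i, i < n → pvSz n (List.range n) i = 1 := by
    intro i hi
    unfold pvSz
    have : (List.range n).filter (fun t => decide (pvFindA (List.range n) n t = i)) =
        (List.range n).filter (fun t => decide (t = i)) := by
      apply List.filter_congr
      intro t ht
      rw [pvFind_range n n t (List.mem_range.mp ht) (by omega)]
    rw [this, List.filter_eq]
    simp [List.count_range, hi]
  refine ⟨hW, List.length_range, ?_, ?_, ?_, ?_⟩
  · intro i j hi hj
    rw [pvFind_range n n i hi (by omega), pvFind_range n n j hj (by omega),
      pvRange_getD0 n i hi, pvRange_getD0 n j hj]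
  · intro i hi _; rw [pvReplicate_getD n i hi, hsz i hi]
  · intro i hi
    rw [pvReplicate_getD n i hi, pvFind_range n n i hi (by omega), hsz i hi]
  · unfold pvRootsCount
    have : (List.range n).filter (fun i => decide ((List.range n).getD i i = i)) =
        List.range n := by
      apply List.filter_eq_self.mpr
      intro i hi
      have := List.mem_range.mp hi
      simp [this]
    rw [this, List.length_range]

-- both ports sort the same edge list with the same key
theorem pvEdges_eq (boxes : List (List Int)) (n : Nat) :
    pvSortBoxes boxes n = pvSortedEdgesB boxes n := by
  unfold pvSortBoxes pvSortedEdgesB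
  have h1 : pvCombos n = pvEdgesB n := by
    unfold pvCombos pvEdgesB
    congr 1
    funext i
    rw [List.range_eq_range', List.drop_range']
    simp
  have h2 : pvDistA = pvDistB := rfl
  rw [h1, h2]

theorem pvEdges_bounds (boxes : List (List Int)) (n : Nat) :
    ∀ e ∈ pvSortBoxes boxes n, e.1 < n ∧ e.2 < n := by
  intro e he
  have hm : e ∈ pvCombos n := (PySem.List.mem_sorted _ _ _ _).mp he
  unfold pvCombos at hm
  rcases List.mem_flatMap.mp hm with ⟨i, hi, hmap⟩
  rcases List.mem_map.mp hmap with ⟨j, hj, rfl⟩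
  exact ⟨List.mem_range.mp hi, List.mem_range.mp (List.mem_of_mem_drop hj)⟩

-- ===== VERDICT (by name: the statement is the Claim_ definition above) =====
theorem calculate_spec : Claim_equal_calculate := by
  intro boxes _ hpre
  show calculate boxes = calculate_alt boxes
  have hA : calculate boxes = pvLoopA boxes boxes.length (pvSortBoxes boxes boxes.length)
      (List.range boxes.length) (List.replicate boxes.length 1) := rfl
  have hB : calculate_alt boxes = pvLoopB boxes (pvSortedEdgesB boxes boxes.length)
      (List.range boxes.length) boxes.length := rfl
  rw [hA, hB, ← pvEdges_eq]
  exact pvLoop_eq boxes boxes.length (pvSortBoxes boxes boxes.length) _ _ _ _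
    (pvInit_inv boxes.length) hpre.1 (pvEdges_bounds boxes boxes.length)
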